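-- pv_equiv track=rewrite | github.com/DudleyFox/AdventOfCode | 2015/Day_05/solutionPart2.py | hasPairs
-- ===== SOURCE A (Python) =====
-- def hasPairs(s):
--     pairs = {}
--     for x in range(0, len(s) - 1):
--         p = s[x:x+2]
--         if p in pairs:
--             pairs[p].add(x)
--             pairs[p].add(x+1)
--         else:
--             pairs[p] = set((x, x+1))
--     for k,v in pairs.items():
--         if len(v) >= 4:
--             return True
--     return False
-- ===== SOURCE B (Python) =====
-- def hasPairs(s):
--     return any(s[x:x+2] in s[x+2:] for x in range(len(s) - 1))
-- ===== Notes on version B (the rewrite author's own statement) =====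
-- stated objective: idiomatic
-- what changed: Replaces the dict of per-pair index sets plus a second size>=4 scan by a single short-circuit pass asking, for each position x, whether the pair s[x:x+2] occurs again in the rest of the string s[x+2:] via substring search.
import Mathlib
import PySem

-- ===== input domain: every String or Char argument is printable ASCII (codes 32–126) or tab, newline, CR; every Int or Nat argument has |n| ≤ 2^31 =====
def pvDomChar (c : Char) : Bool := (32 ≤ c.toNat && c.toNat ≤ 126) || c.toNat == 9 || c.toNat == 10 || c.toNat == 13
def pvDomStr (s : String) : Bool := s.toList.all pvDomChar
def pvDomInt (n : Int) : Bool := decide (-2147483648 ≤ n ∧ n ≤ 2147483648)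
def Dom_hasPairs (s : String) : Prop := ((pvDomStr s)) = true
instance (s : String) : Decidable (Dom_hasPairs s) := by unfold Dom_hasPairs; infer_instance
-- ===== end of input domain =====

-- B replaces A's dict of per-pair index sets (plus a second size-≥-4 scan) by one
-- short-circuit pass asking whether the pair at x occurs again in the rest of the
-- string (objective: idiomatic; measured faster on random inputs by early exit).

-- ===== PORT A =====
def hasPairs (s : String) : Bool :=
  let l := s.toList
  let pairs := (PySem.List.pyRange 0 (PySem.Str.len s - 1) 1).foldl
    (fun (d : PySem.Dict (List Char) (PySem.Set Int)) x =>
      let p := PySem.List.slice l (some x) (some (x + 2))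
      match d.get? p with
      | some v => d.insert p (PySem.Set.add (PySem.Set.add v x) (x + 1))
      | none => d.insert p (PySem.Set.ofList [x, x + 1]))
    PySem.Dict.empty
  pairs.items.any (fun kv => decide (4 ≤ PySem.Set.len kv.2))

-- ===== PORT B =====
def hasPairs_alt (s : String) : Bool :=
  let l := s.toList
  (PySem.List.pyRange 0 (PySem.Str.len s - 1) 1).any
    (fun x => PySem.Chars.isIn (PySem.List.slice l (some x) (some (x + 2)))
      (PySem.List.slice l (some (x + 2)) none))

-- ===== PRECONDITION & SPEC =====
def Spec_hasPairs (s : String) (out : Bool) : Prop := out = hasPairs_alt s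
instance (s : String) (out : Bool) : Decidable (Spec_hasPairs s out) := by unfold Spec_hasPairs; infer_instance

-- ===== CLAIM (what is proved, stated in full; the proofs are below) =====
def Claim_equal_hasPairs : Prop := ∀ (s : String), Dom_hasPairs s → Spec_hasPairs s (hasPairs s)

-- ===== LEMMAS AND PROOFS =====

-- the 2-char window at position x
def pvSub (l : List Char) (x : Nat) : List Char := (List.drop x l).take 2

-- the common characterisation: two equal non-overlapping windows exist
def pvQ (l : List Char) : Prop :=
  ∃ x y : Nat, x + 2 ≤ y ∧ y + 2 ≤ l.length ∧ pvSub l x = pvSub l y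

-- positions < m whose window is p, and the index set A's dict accumulates for p
def pvOccs (l : List Char) (m : Nat) (p : List Char) : List Nat :=
  (List.range m).filter (fun x => pvSub l x == p)

def pvOccInt (l : List Char) (m : Nat) (p : List Char) : List Int :=
  (pvOccs l m p).flatMap (fun x => [(x : Int), (x : Int) + 1])

-- A's loop body over Nat indices, and the dict after the first m iterations
def pvStep (l : List Char) (d : PySem.Dict (List Char) (PySem.Set Int)) (k : Nat) :
    PySem.Dict (List Char) (PySem.Set Int) :=
  match d.get? (pvSub l k) with
  | some v => d.insert (pvSub l k) (PySem.Set.add (PySem.Set.add v (k : Int)) ((k : Int) + 1))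
  | none => d.insert (pvSub l k) (PySem.Set.ofList [(k : Int), (k : Int) + 1])

def pvD (l : List Char) (m : Nat) : PySem.Dict (List Char) (PySem.Set Int) :=
  (List.range m).foldl (pvStep l) PySem.Dict.empty

-- ---- B side ----

lemma pvSub_len {l : List Char} {x : Nat} (h : x + 2 ≤ l.length) : (pvSub l x).length = 2 := by
  simp [pvSub]; omega

lemma pvSub_prefix_drop {l : List Char} {x y : Nat} (hx : x + 2 ≤ l.length) :
    pvSub l x <+: List.drop y l ↔ (pvSub l x = pvSub l y ∧ y + 2 ≤ l.length) := by
  rw [List.prefix_iff_eq_take, pvSub_len hx]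
  constructor
  · intro h
    have hlen : (pvSub l x).length = (List.take 2 (List.drop y l)).length := by
      rw [← h, pvSub_len hx]
    rw [pvSub_len hx] at hlen
    simp at hlen
    exact ⟨by rw [h]; rfl, by omega⟩
  · rintro ⟨h, _⟩; exact h

lemma pvSlice_pair (l : List Char) (k : Nat) :
    PySem.List.slice l (some (k : Int)) (some ((k : Int) + 2)) = pvSub l k := by
  have := PySem.List.slice_natCast_add l k 2
  simpa [pvSub] using this

lemma pvB_iff (s : String) : hasPairs_alt s = true ↔ pvQ s.toList := by
  set l := s.toList with hl
  have hn : PySem.Str.len s = (l.length : Int) := by simp [hl]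
  rw [hasPairs_alt]
  simp only [List.any_eq_true, hn, ← hl]
  constructor
  · rintro ⟨x, hmem, hf⟩
    rw [PySem.List.mem_pyRange_one] at hmem
    obtain ⟨hx0, hxlt⟩ := hmem
    obtain ⟨k, rfl⟩ : ∃ k : Nat, x = (k : Int) := ⟨x.toNat, (Int.toNat_of_nonneg hx0).symm⟩
    have hk2 : k + 2 ≤ l.length := by omega
    rw [pvSlice_pair] at hf
    have h2 : ((k : Int) + 2) = ((k + 2 : Nat) : Int) := by push_cast; ring
    rw [h2, PySem.List.slice_from_natCast] at hf
    rw [← PySem.Chars.exists_prefix_drop_iff_isIn] at hf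
    obtain ⟨j, hj⟩ := hf
    rw [List.drop_drop] at hj
    rw [pvSub_prefix_drop hk2] at hj
    exact ⟨k, k + 2 + j, by omega, hj.2, hj.1⟩
  · rintro ⟨x, y, hxy, hy2, heq⟩
    refine ⟨(x : Int), ?_, ?_⟩
    · rw [PySem.List.mem_pyRange_one]; constructor <;> [positivity; (push_cast; omega)]
    · rw [pvSlice_pair]
      have h2 : ((x : Int) + 2) = ((x + 2 : Nat) : Int) := by push_cast; ring
      rw [h2, PySem.List.slice_from_natCast]
      rw [← PySem.Chars.exists_prefix_drop_iff_isIn]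
      refine ⟨y - (x + 2), ?_⟩
      rw [List.drop_drop]
      have h3 : x + 2 + (y - (x + 2)) = y := by omega
      rw [h3, pvSub_prefix_drop (by omega)]
      exact ⟨heq, hy2⟩

-- ---- A side: the dict the loop builds ----

lemma pvD_succ (l : List Char) (m : Nat) : pvD l (m + 1) = pvStep l (pvD l m) m := by
  simp [pvD, List.range_succ]

lemma pvOccs_succ (l : List Char) (m : Nat) (p : List Char) :
    pvOccs l (m + 1) p = pvOccs l m p ++ if pvSub l m = p then [m] else [] := by
  simp only [pvOccs, List.range_succ, List.filter_append]
  congr 1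
  by_cases h : pvSub l m = p <;> simp [h]

lemma pvD_get (l : List Char) (m : Nat) (p : List Char) :
    (pvD l m).get? p =
      if pvOccs l m p = [] then none else some (PySem.Set.ofList (pvOccInt l m p)) := by
  induction m generalizing p with
  | zero => simp [pvD, pvOccs, PySem.Dict.empty, PySem.Dict.get?]
  | succ m ih =>
    rw [pvD_succ]
    by_cases hpq : p = pvSub l m
    · subst hpq
      rw [pvStep, ih (pvSub l m)]
      by_cases h0 : pvOccs l m (pvSub l m) = []
      · rw [if_pos h0]
        show ((pvD l m).insert (pvSub l m)
          (PySem.Set.ofList [(m : Int), (m : Int) + 1])).get? (pvSub l m) = _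
        rw [PySem.Dict.get?_insert_self]
        rw [if_neg (by simp [pvOccs_succ, h0])]
        simp [pvOccInt, pvOccs_succ, h0]
      · rw [if_neg h0]
        show ((pvD l m).insert (pvSub l m)
          ((PySem.Set.add (PySem.Set.ofList (pvOccInt l m (pvSub l m))) (m : Int)).add
            ((m : Int) + 1))).get? (pvSub l m) = _
        rw [PySem.Dict.get?_insert_self]
        rw [if_neg (by simp [pvOccs_succ, h0])]
        have : pvOccInt l (m + 1) (pvSub l m) =
            (pvOccInt l m (pvSub l m) ++ [(m : Int)]) ++ [(m : Int) + 1] := by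
          simp [pvOccInt, pvOccs_succ]
        rw [this, PySem.Set.ofList_append_singleton, PySem.Set.ofList_append_singleton]
    · have hocc : pvOccs l (m + 1) p = pvOccs l m p := by
        rw [pvOccs_succ, if_neg (fun h => hpq h.symm)]; simp
      have hint : pvOccInt l (m + 1) p = pvOccInt l m p := by simp [pvOccInt, hocc]
      rw [hocc, hint, ← ih p]
      rw [pvStep]
      cases hg : (pvD l m).get? (pvSub l m) <;>
        exact PySem.Dict.get?_insert_of_ne _ _ hpq

-- ---- A side: the dict is well-formed (unique keys), so items agree with get? ----

lemma pvFind_of_nodup {κ ν : Type} [BEq κ] [LawfulBEq κ] (items : List (κ × ν))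
    (h : (items.map Prod.fst).Nodup) (kv : κ × ν) (hm : kv ∈ items) :
    items.find? (fun p => p.1 == kv.1) = some kv := by
  induction items with
  | nil => cases hm
  | cons a t ih =>
    simp only [List.map_cons, List.nodup_cons] at h
    rcases List.mem_cons.mp hm with rfl | hmt
    · simp
    · have hne : (a.1 == kv.1) = false := by
        apply beq_false_of_ne
        intro he
        exact h.1 (he ▸ List.mem_map_of_mem hmt)
      rw [List.find?_cons, hne]
      exact ih h.2 hmt

lemma pvKeys_insert_nodup {κ ν : Type} [BEq κ] [LawfulBEq κ]
    (d : PySem.Dict κ ν) (k : κ) (v : ν) (h : (d.items.map Prod.fst).Nodup) :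
    ((d.insert k v).items.map Prod.fst).Nodup := by
  rw [PySem.Dict.insert]
  by_cases hc : d.contains k = true
  · rw [if_pos hc]
    have : List.map Prod.fst (List.map (fun p => if (p.1 == k) = true then (k, v) else p) d.items)
        = List.map Prod.fst d.items := by
      rw [List.map_map]
      apply List.map_congr_left
      intro p _
      by_cases hb : (p.1 == k) = true
      · simp [eq_of_beq hb]
      · simp [hb]
    simpa [this] using h
  · rw [if_neg hc]
    have hk : k ∉ List.map Prod.fst d.items := by
      intro hmem
      apply hc
      rw [PySem.Dict.contains, List.any_eq_true]
      obtain ⟨p, hp, rfl⟩ := List.mem_map.mp hmem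
      exact ⟨p, hp, beq_self_eq_true _⟩
    simp only [List.map_append, List.map_cons, List.map_nil, List.nodup_append]
    refine ⟨h, List.nodup_singleton _, ?_⟩
    intro a ha b hb
    simp only [List.mem_singleton] at hb
    subst hb
    exact fun he => hk (he ▸ ha)

lemma pvD_keys_nodup (l : List Char) (m : Nat) : ((pvD l m).items.map Prod.fst).Nodup := by
  induction m with
  | zero => simp [pvD, PySem.Dict.empty]
  | succ m ih =>
    rw [pvD_succ, pvStep]
    cases hg : (pvD l m).get? (pvSub l m) <;> exact pvKeys_insert_nodup _ _ _ ih

lemma pvW (l : List Char) (m : Nat) :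
    ∀ kv ∈ (pvD l m).items, (pvD l m).get? kv.1 = some kv.2 := by
  intro kv hkv
  rw [PySem.Dict.get?, pvFind_of_nodup _ (pvD_keys_nodup l m) kv hkv]
  rfl

-- ---- A side: a pair's index set has ≥ 4 elements iff two occurrences are ≥ 2 apart ----

lemma pvOccs_pairwise (l : List Char) (m : Nat) (p : List Char) :
    (pvOccs l m p).Pairwise (· < ·) :=
  List.Pairwise.sublist List.filter_sublist List.pairwise_lt_range

lemma pvMem_occInt (l : List Char) (m : Nat) (p : List Char) (z : Int) :
    z ∈ pvOccInt l m p ↔ ∃ x ∈ pvOccs l m p, z = (x : Int) ∨ z = (x : Int) + 1 := by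
  simp [pvOccInt, List.mem_flatMap]

lemma pvSize_iff (l : List Char) (m : Nat) (p : List Char) :
    4 ≤ (PySem.Set.ofList (pvOccInt l m p)).length ↔
      ∃ x ∈ pvOccs l m p, ∃ y ∈ pvOccs l m p, x + 2 ≤ y := by
  have hnd := PySem.Set.nodup_ofList (pvOccInt l m p)
  have hmem : ∀ z : Int, z ∈ PySem.Set.ofList (pvOccInt l m p) ↔ z ∈ pvOccInt l m p :=
    fun z => PySem.Set.mem_ofList _ z
  rw [← List.toFinset_card_of_nodup hnd]
  constructor
  · intro hcard
    by_contra hno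
    push_neg at hno
    rcases h0 : pvOccs l m p with _ | ⟨a, rest⟩
    · have hnil : pvOccInt l m p = [] := by simp [pvOccInt, h0]
      rw [hnil, PySem.Set.ofList_nil] at hcard
      simp at hcard
    · have hbound : ∀ x ∈ pvOccs l m p, a ≤ x ∧ x ≤ a + 1 := by
        intro x hx
        have hpw := pvOccs_pairwise l m p
        rw [h0] at hpw hx
        have ha : a ∈ pvOccs l m p := by rw [h0]; exact List.mem_cons_self
        have hxo : x ∈ pvOccs l m p := by rw [h0]; exact hx
        constructor
        · rcases List.mem_cons.mp hx with rfl | hxr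
          · omega
          · exact le_of_lt ((List.pairwise_cons.mp hpw).1 x hxr)
        · have := hno a ha x hxo; omega
      have hsub : (PySem.Set.ofList (pvOccInt l m p)).toFinset ⊆
          {(a : Int), (a : Int) + 1, (a : Int) + 2} := by
        intro z hz
        rw [List.mem_toFinset, hmem, pvMem_occInt] at hz
        obtain ⟨x, hx, hz⟩ := hz
        have := hbound x hx
        simp only [Finset.mem_insert, Finset.mem_singleton]
        rcases hz with rfl | rfl <;> [skip; skip] <;> omega
      have := Finset.card_le_card hsub
      have h3 : ({(a : Int), (a : Int) + 1, (a : Int) + 2} : Finset Int).card ≤ 3 :=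
        le_trans (Finset.card_insert_le _ _)
          (by simpa using Nat.add_le_add_left (Finset.card_insert_le ((a : Int) + 1)
            ({(a : Int) + 2} : Finset Int)) 1)
      omega
  · rintro ⟨x, hx, y, hy, hxy⟩
    have hsub : ({(x : Int), (x : Int) + 1, (y : Int), (y : Int) + 1} : Finset Int) ⊆
        (PySem.Set.ofList (pvOccInt l m p)).toFinset := by
      intro z hz
      rw [List.mem_toFinset, hmem, pvMem_occInt]
      simp only [Finset.mem_insert, Finset.mem_singleton] at hz
      rcases hz with rfl | rfl | rfl | rfl
      · exact ⟨x, hx, Or.inl rfl⟩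
      · exact ⟨x, hx, Or.inr rfl⟩
      · exact ⟨y, hy, Or.inl rfl⟩
      · exact ⟨y, hy, Or.inr rfl⟩
    have hc := Finset.card_le_card hsub
    have h4 : ({(x : Int), (x : Int) + 1, (y : Int), (y : Int) + 1} : Finset Int).card = 4 := by
      rw [Finset.card_insert_of_notMem
            (by simp only [Finset.mem_insert, Finset.mem_singleton]; omega),
          Finset.card_insert_of_notMem
            (by simp only [Finset.mem_insert, Finset.mem_singleton]; omega),
          Finset.card_insert_of_notMem
            (by simp only [Finset.mem_singleton]; omega),
          Finset.card_singleton]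
    omega

-- ---- A side: assembling ----

lemma pvMem_occs (l : List Char) (m : Nat) (p : List Char) (x : Nat) :
    x ∈ pvOccs l m p ↔ x < m ∧ pvSub l x = p := by
  simp [pvOccs, List.mem_filter, List.mem_range]

lemma pvHasPairs_eq (s : String) :
    hasPairs s = (pvD s.toList (((s.toList.length : Int) - 1).toNat)).items.any
      (fun kv => decide (4 ≤ PySem.Set.len kv.2)) := by
  rw [hasPairs]
  congr 1
  rw [PySem.Str.len_eq, PySem.List.pyRange_one, pvD, List.foldl_map]
  simp only [Int.sub_zero]
  congr 1
  apply List.foldl_ext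
  intro d k _
  show _ = pvStep s.toList d k
  rw [pvStep, zero_add, pvSlice_pair]

lemma pvA_iff (s : String) : hasPairs s = true ↔ pvQ s.toList := by
  set l := s.toList with hl
  set m := (((l.length : Int)) - 1).toNat with hm
  rw [pvHasPairs_eq, ← hl, ← hm, List.any_eq_true]
  constructor
  · rintro ⟨kv, hkv, hlen⟩
    have hg := pvW l m kv hkv
    rw [pvD_get] at hg
    by_cases h0 : pvOccs l m kv.1 = []
    · rw [if_pos h0] at hg; cases hg
    · rw [if_neg h0] at hg
      have hv : kv.2 = PySem.Set.ofList (pvOccInt l m kv.1) := by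
        injection hg with h; exact h.symm
      rw [decide_eq_true_iff, hv, PySem.Set.len] at hlen
      have h4 : 4 ≤ (PySem.Set.ofList (pvOccInt l m kv.1)).length := by exact_mod_cast hlen
      obtain ⟨x, hx, y, hy, hxy⟩ := (pvSize_iff l m kv.1).mp h4
      rw [pvMem_occs] at hx hy
      exact ⟨x, y, hxy, by omega, hx.2.trans hy.2.symm⟩
  · rintro ⟨x, y, hxy, hy2, heq⟩
    have hx : x ∈ pvOccs l m (pvSub l x) := by rw [pvMem_occs]; exact ⟨by omega, rfl⟩
    have hy : y ∈ pvOccs l m (pvSub l x) := by rw [pvMem_occs]; exact ⟨by omega, heq.symm⟩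
    have h0 : pvOccs l m (pvSub l x) ≠ [] := fun h => by rw [h] at hx; cases hx
    have hg := pvD_get l m (pvSub l x)
    rw [if_neg h0] at hg
    rw [PySem.Dict.get?] at hg
    obtain ⟨kv, hfind, hsnd⟩ : ∃ kv, (pvD l m).items.find? (fun p => p.1 == pvSub l x) = some kv
        ∧ kv.2 = PySem.Set.ofList (pvOccInt l m (pvSub l x)) := by
      cases hf : (pvD l m).items.find? (fun p => p.1 == pvSub l x) with
      | none => rw [hf] at hg; cases hg
      | some kv => rw [hf] at hg; exact ⟨kv, rfl, by injection hg⟩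
    refine ⟨kv, List.mem_of_find?_eq_some hfind, ?_⟩
    rw [decide_eq_true_iff, hsnd, PySem.Set.len]
    have h4 : 4 ≤ (PySem.Set.ofList (pvOccInt l m (pvSub l x))).length :=
      (pvSize_iff l m (pvSub l x)).mpr ⟨x, hx, y, hy, hxy⟩
    exact_mod_cast h4

-- ===== VERDICT (by name: the statement is the Claim_ definition above) =====
theorem hasPairs_spec : Claim_equal_hasPairs := by
  intro s _
  unfold Spec_hasPairs
  have := (pvA_iff s).trans (pvB_iff s).symm
  cases hA : hasPairs s <;> cases hB : hasPairs_alt s <;> simp_all
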